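-- pv_equiv track=rewrite | github.com/adarshs02/CSE472 | cse472project2_part4_sol.py | analyze_user_tone
-- ===== SOURCE A (Python) =====
-- def analyze_user_tone(messages, target_user, cut_index):
--     """Analyze the target user's tone and stance."""
--     user_messages = [msg for msg in messages[:cut_index] if msg.get('From') == target_user]
--
--     if not user_messages:
--         return "neutral and respectful"
--
--     total_text = " ".join([msg.get('Reply_Text', '') for msg in user_messages])
--
--     has_caps = sum(1 for word in total_text.split() if word.isupper() and len(word) > 2) > 0
--     has_exclamations = total_text.count('!') > 2
--     has_insults = any(word in total_text.lower() for word in ['idiot', 'stupid', 'dumb', 'ridiculous', 'absurd'])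
--
--     if has_caps or has_exclamations or has_insults:
--         return "argumentative, somewhat aggressive, and emotionally charged"
--     else:
--         return "assertive but relatively measured"
-- ===== SOURCE B (Python) =====
-- def analyze_user_tone(messages, target_user, cut_index):
--     """Analyze the target user's tone and stance (single pass, no joined text)."""
--     found = False
--     caps = False
--     excl = 0
--     insult = False
--     for msg in messages[:cut_index]:
--         if msg.get('From') != target_user:
--             continue
--         found = True
--         text = msg.get('Reply_Text', '')
--         for word in text.split():
--             if word.isupper() and len(word) > 2:
--                 caps = True
--         excl += text.count('!')
--         low = text.lower()
--         for bad in ('idiot', 'stupid', 'dumb', 'ridiculous', 'absurd'):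
--             if bad in low:
--                 insult = True
--     if not found:
--         return "neutral and respectful"
--     if caps or excl > 2 or insult:
--         return "argumentative, somewhat aggressive, and emotionally charged"
--     return "assertive but relatively measured"
-- ===== Notes on version B (the rewrite author's own statement) =====
-- stated objective: alternative
-- what changed: B replaces A's build-then-scan shape (filter the messages, join all reply texts into one string, then scan it three separate times for caps/exclamations/insults) with one fused pass that folds found/caps/exclamation-count/insult flags per message and never materialises the joined text.
import Mathlib
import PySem

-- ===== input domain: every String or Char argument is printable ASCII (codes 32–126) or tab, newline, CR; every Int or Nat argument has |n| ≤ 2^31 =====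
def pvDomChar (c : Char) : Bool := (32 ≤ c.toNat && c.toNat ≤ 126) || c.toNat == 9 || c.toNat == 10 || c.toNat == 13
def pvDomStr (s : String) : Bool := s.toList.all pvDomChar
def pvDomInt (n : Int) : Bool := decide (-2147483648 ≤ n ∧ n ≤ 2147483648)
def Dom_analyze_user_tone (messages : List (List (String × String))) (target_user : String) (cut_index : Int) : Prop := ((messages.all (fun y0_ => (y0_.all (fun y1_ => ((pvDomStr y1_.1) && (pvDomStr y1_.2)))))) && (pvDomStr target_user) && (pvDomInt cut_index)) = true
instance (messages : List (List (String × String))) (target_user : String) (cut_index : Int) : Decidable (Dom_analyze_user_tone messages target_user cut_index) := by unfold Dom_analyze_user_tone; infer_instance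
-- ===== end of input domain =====

-- B is a single fused pass over messages[:cut_index] (no joined text, no three re-scans); same return value everywhere.

-- ===== PORT A =====
-- Python str.isupper(): at least one cased character and no lowercase one — exact on the ASCII domain, where the cased characters are A–Z and a–z.
def pvIsUpperWord (w : String) : Bool := w.toList.any PySem.Chars.isupper && !(w.toList.any PySem.Chars.islower)

def pvInsults : List String := ["idiot", "stupid", "dumb", "ridiculous", "absurd"]

def analyze_user_tone (messages : List (List (String × String))) (target_user : String) (cut_index : Int) : String :=
  let user_messages := (PySem.List.slice messages none (some cut_index)).filter
    (fun msg => (PySem.Dict.mk msg).get? "From" == some target_user)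
  if user_messages.isEmpty then "neutral and respectful"
  else
    let total_text := PySem.Str.join " " (user_messages.map (fun msg => (PySem.Dict.mk msg).getD "Reply_Text" ""))
    let has_caps := decide (0 < ((PySem.Str.split₀ total_text).map
      (fun w => if pvIsUpperWord w && decide (2 < PySem.Str.len w) then (1 : Int) else 0)).sum)
    let has_exclamations := decide (2 < PySem.Str.count total_text "!")
    let has_insults := pvInsults.any (fun w => PySem.Str.isIn w (PySem.Str.lower total_text))
    if has_caps || has_exclamations || has_insults then
      "argumentative, somewhat aggressive, and emotionally charged"
    else
      "assertive but relatively measured"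

-- ===== PORT B =====
def analyze_user_tone_alt (messages : List (List (String × String))) (target_user : String) (cut_index : Int) : String :=
  let st := (PySem.List.slice messages none (some cut_index)).foldl
    (fun (st : Bool × Bool × Int × Bool) msg =>
      if (PySem.Dict.mk msg).get? "From" == some target_user then
        let text := (PySem.Dict.mk msg).getD "Reply_Text" ""
        let caps := (PySem.Str.split₀ text).foldl
          (fun c w => if pvIsUpperWord w && decide (2 < PySem.Str.len w) then true else c) st.2.1
        let excl := st.2.2.1 + (PySem.Str.count text "!" : Int)
        let low := PySem.Str.lower text
        let ins := pvInsults.foldl (fun i bad => if PySem.Str.isIn bad low then true else i) st.2.2.2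
        (true, caps, excl, ins)
      else st)
    (false, false, 0, false)
  if !st.1 then "neutral and respectful"
  else if st.2.1 || decide (2 < st.2.2.1) || st.2.2.2 then
    "argumentative, somewhat aggressive, and emotionally charged"
  else
    "assertive but relatively measured"

-- ===== PRECONDITION & SPEC =====
def Spec_analyze_user_tone (messages : List (List (String × String))) (target_user : String) (cut_index : Int) (out : String) : Prop := out = analyze_user_tone_alt messages target_user cut_index
instance (messages : List (List (String × String))) (target_user : String) (cut_index : Int) (out : String) : Decidable (Spec_analyze_user_tone messages target_user cut_index out) := by unfold Spec_analyze_user_tone; infer_instance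

-- ===== CLAIM (what is proved, stated in full; the proofs are below) =====
def Claim_equal_analyze_user_tone : Prop := ∀ (messages : List (List (String × String))) (target_user : String) (cut_index : Int), Dom_analyze_user_tone messages target_user cut_index → Spec_analyze_user_tone messages target_user cut_index (analyze_user_tone messages target_user cut_index)

-- ===== LEMMAS AND PROOFS =====

-- split(): the accumulator of split₀.go is a pure prefix
theorem pv_go_acc (s cur : List Char) (acc : List (List Char)) :
    PySem.Chars.split₀.go s cur acc = acc.reverse ++ PySem.Chars.split₀.go s cur [] := by
  induction s generalizing cur acc with
  | nil => simp [PySem.Chars.split₀.go]; split <;> simp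
  | cons c rest ih =>
    simp only [PySem.Chars.split₀.go]
    split
    · split
      · exact ih _ _
      · rw [ih _ (cur.reverse :: acc), ih _ [cur.reverse]]; simp
    · exact ih _ _

-- splitting at an inserted space splits the split
theorem pv_go_space (a b cur : List Char) (acc : List (List Char)) :
    PySem.Chars.split₀.go (a ++ ' ' :: b) cur acc =
      PySem.Chars.split₀.go a cur acc ++ PySem.Chars.split₀.go b [] [] := by
  induction a generalizing cur acc with
  | nil =>
    simp only [List.nil_append, PySem.Chars.split₀.go]
    have hsp : PySem.Chars.isspace ' ' = true := by decide
    rw [hsp]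
    simp only [if_true]
    split
    · rw [pv_go_acc b [] acc]
    · rw [pv_go_acc b [] (cur.reverse :: acc)]
  | cons c rest ih =>
    simp only [List.cons_append, PySem.Chars.split₀.go]
    split
    · split
      · exact ih _ _
      · exact ih _ _
    · exact ih _ _

theorem pv_split0_append_space (a b : List Char) :
    PySem.Chars.split₀ (a ++ ' ' :: b) = PySem.Chars.split₀ a ++ PySem.Chars.split₀ b := by
  simp only [PySem.Chars.split₀]; exact pv_go_space a b [] []

theorem pv_join_cons_cons (sep t u : List Char) (ts : List (List Char)) :
    PySem.Chars.join sep (t :: u :: ts) = t ++ sep ++ PySem.Chars.join sep (u :: ts) := by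
  simp [PySem.Chars.join, List.intercalate, List.intersperse]

theorem pv_join_singleton (sep t : List Char) : PySem.Chars.join sep [t] = t := by
  simp [PySem.Chars.join, List.intercalate, List.intersperse]

theorem pv_split0_join (ts : List (List Char)) :
    PySem.Chars.split₀ (PySem.Chars.join [' '] ts) = ts.flatMap PySem.Chars.split₀ := by
  induction ts with
  | nil => simp [PySem.Chars.join, List.intercalate, PySem.Chars.split₀, PySem.Chars.split₀.go]
  | cons t ts ih =>
    cases ts with
    | nil => simp [pv_join_singleton]
    | cons u ts' =>
      rw [pv_join_cons_cons]
      have hj : t ++ [' '] ++ PySem.Chars.join [' '] (u :: ts') = t ++ (' ' :: PySem.Chars.join [' '] (u :: ts')) := by simp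
      rw [hj, pv_split0_append_space, ih]
      simp


-- count of a single-character needle is List.count
theorem pv_countgo_single (c : Char) (s : List Char) (fuel : Nat) (acc : Nat)
    (h : s.length ≤ fuel) : PySem.Chars.count.go [c] fuel s acc = acc + s.count c := by
  induction s generalizing fuel acc with
  | nil => cases fuel <;> simp [PySem.Chars.count.go]
  | cons x t ih =>
    cases fuel with
    | zero => simp at h
    | succ f =>
      simp only [PySem.Chars.count.go]
      by_cases hx : x = c
      · subst hx
        have hpt : [x].isPrefixOf (x :: t) = true := by simp [List.isPrefixOf]
        rw [if_pos hpt]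
        have hd : List.drop [x].length (x :: t) = t := by simp
        rw [hd, ih f (acc + 1) (by simp at h; omega)]
        simp [List.count_cons]
        omega
      · have hpf : [c].isPrefixOf (x :: t) = false := by
          simp [List.isPrefixOf]
          exact fun hh => hx hh.symm
        simp only [hpf, Bool.false_eq_true, if_false]
        rw [ih f acc (by simp at h; omega)]
        simp [List.count_cons, hx]

theorem pv_count_single (s : List Char) (c : Char) :
    PySem.Chars.count s [c] = s.count c := by
  simp only [PySem.Chars.count, List.isEmpty_cons, Bool.false_eq_true, if_false]
  simpa using pv_countgo_single c s s.length 0 (le_refl _)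

theorem pv_count_join_excl (ts : List (List Char)) :
    (PySem.Chars.join [' '] ts).count '!' = (ts.map (fun t => t.count '!')).sum := by
  induction ts with
  | nil => simp [PySem.Chars.join, List.intercalate]
  | cons t ts ih =>
    cases ts with
    | nil => simp [pv_join_singleton]
    | cons u ts' =>
      rw [pv_join_cons_cons]
      simp only [List.count_append, List.map_cons, List.sum_cons]
      rw [ih]
      simp [List.count_cons]

-- a needle without spaces cannot cross the inserted space
theorem pv_prefix_no_space (sub a b : List Char) :
    ' ' ∉ sub → sub <+: a ++ ' ' :: b → sub <+: a := by
  induction sub generalizing a with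
  | nil => intro _ _; exact List.nil_prefix
  | cons s sub' ih =>
    intro h hp
    cases a with
    | nil =>
      simp only [List.nil_append] at hp
      rcases List.cons_prefix_cons.mp hp with ⟨h1, _⟩
      exact absurd (h1 ▸ List.mem_cons_self) h
    | cons x a' =>
      rcases List.cons_prefix_cons.mp hp with ⟨h1, h2⟩
      exact List.cons_prefix_cons.mpr ⟨h1, ih _ (fun hm => h (List.mem_cons_of_mem _ hm)) h2⟩

theorem pv_infix_space (sub a b : List Char) (h : ' ' ∉ sub) (hne : sub ≠ []) :
    sub <:+: a ++ ' ' :: b ↔ sub <:+: a ∨ sub <:+: b := by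
  constructor
  · intro hi
    induction a with
    | nil =>
      simp only [List.nil_append] at hi
      rcases List.infix_cons_iff.mp hi with hp | hi'
      · cases sub with
        | nil => exact absurd rfl hne
        | cons s sub' =>
          rcases List.cons_prefix_cons.mp hp with ⟨h1, _⟩
          exact absurd (h1 ▸ List.mem_cons_self) h
      · exact Or.inr hi'
    | cons x a' ih =>
      rcases List.infix_cons_iff.mp hi with hp | hi'
      · exact Or.inl (pv_prefix_no_space sub (x :: a') b h hp).isInfix
      · rcases ih hi' with h1 | h2
        · exact Or.inl (List.infix_cons h1)
        · exact Or.inr h2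
  · rintro (h1 | h2)
    · exact h1.trans (List.prefix_append _ _).isInfix
    · exact h2.trans ((List.suffix_cons _ _).trans (List.suffix_append _ _)).isInfix

theorem pv_isIn_join (sub : List Char) (ts : List (List Char)) (h : ' ' ∉ sub) (hne : sub ≠ []) :
    PySem.Chars.isIn sub (PySem.Chars.join [' '] ts) = ts.any (fun t => PySem.Chars.isIn sub t) := by
  induction ts with
  | nil =>
    simp only [List.any_nil]
    rw [PySem.Chars.isIn_eq_false_iff]
    intro hi
    have := List.eq_nil_of_infix_nil (by simpa [PySem.Chars.join, List.intercalate] using hi)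
    exact hne this
  | cons t ts ih =>
    cases ts with
    | nil => simp [pv_join_singleton]
    | cons u ts' =>
      rw [pv_join_cons_cons]
      have hj : t ++ [' '] ++ PySem.Chars.join [' '] (u :: ts') = t ++ (' ' :: PySem.Chars.join [' '] (u :: ts')) := by simp
      rw [hj]
      apply Bool.coe_iff_coe.mp
      simp only [List.any_cons, Bool.or_eq_true]
      rw [← Bool.or_eq_true (PySem.Chars.isIn sub u), ← List.any_cons, ← ih]
      simp only [PySem.Chars.isIn_iff_infix]
      exact pv_infix_space sub t _ h hne

theorem pv_lower_join (ts : List (List Char)) :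
    PySem.Chars.lower (PySem.Chars.join [' '] ts) = PySem.Chars.join [' '] (ts.map PySem.Chars.lower) := by
  induction ts with
  | nil => simp [PySem.Chars.join, List.intercalate, PySem.Chars.lower]
  | cons t ts ih =>
    cases ts with
    | nil => simp [pv_join_singleton]
    | cons u ts' =>
      have hsp : PySem.Chars.lowerChar ' ' = ' ' := by decide
      simp only [List.map_cons] at ih ⊢
      rw [pv_join_cons_cons, pv_join_cons_cons]
      simp only [PySem.Chars.lower, List.map_append] at ih ⊢
      rw [ih]
      simp [hsp]

-- a 'flag := True on hit' loop is List.any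
theorem pv_foldl_flag {α : Type} (p : α → Bool) (l : List α) (c : Bool) :
    l.foldl (fun c w => if p w then true else c) c = (c || l.any p) := by
  induction l generalizing c with
  | nil => simp
  | cons x t ih =>
    simp only [List.foldl_cons, List.any_cons]
    by_cases hx : p x = true
    · rw [if_pos hx, ih, hx]; simp
    · rw [if_neg hx, ih]; simp [Bool.eq_false_iff.mpr hx]


-- proof-side names for the per-message quantities of B
def pvReply (msg : List (String × String)) : String := (PySem.Dict.mk msg).getD "Reply_Text" ""

def pvCapsOf (msg : List (String × String)) : Bool :=
  (PySem.Str.split₀ (pvReply msg)).any (fun w => pvIsUpperWord w && decide (2 < PySem.Str.len w))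

def pvExclOf (msg : List (String × String)) : Int := (PySem.Str.count (pvReply msg) "!" : Int)

def pvInsOf (msg : List (String × String)) : Bool :=
  pvInsults.any (fun bad => PySem.Str.isIn bad (PySem.Str.lower (pvReply msg)))

-- B's fused loop, characterised over the filtered message list
theorem pv_foldB (target : String) (l : List (List (String × String))) (f c : Bool) (e : Int) (i : Bool) :
    l.foldl
      (fun (st : Bool × Bool × Int × Bool) msg =>
        if (PySem.Dict.mk msg).get? "From" == some target then
          let text := (PySem.Dict.mk msg).getD "Reply_Text" ""
          let caps := (PySem.Str.split₀ text).foldl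
            (fun c w => if pvIsUpperWord w && decide (2 < PySem.Str.len w) then true else c) st.2.1
          let excl := st.2.2.1 + (PySem.Str.count text "!" : Int)
          let low := PySem.Str.lower text
          let ins := pvInsults.foldl (fun i bad => if PySem.Str.isIn bad low then true else i) st.2.2.2
          (true, caps, excl, ins)
        else st)
      (f, c, e, i)
    = (f || !(l.filter (fun msg => (PySem.Dict.mk msg).get? "From" == some target)).isEmpty,
       c || (l.filter (fun msg => (PySem.Dict.mk msg).get? "From" == some target)).any pvCapsOf,
       e + ((l.filter (fun msg => (PySem.Dict.mk msg).get? "From" == some target)).map pvExclOf).sum,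
       i || (l.filter (fun msg => (PySem.Dict.mk msg).get? "From" == some target)).any pvInsOf) := by
  induction l generalizing f c e i with
  | nil => simp
  | cons m l ih =>
    simp only [List.foldl_cons, List.filter_cons]
    by_cases hm : ((PySem.Dict.mk m).get? "From" == some target) = true
    · rw [if_pos hm]
      rw [ih]
      simp only [hm, if_true, List.isEmpty_cons, List.any_cons, List.map_cons, List.sum_cons,
        Bool.not_false, Bool.or_true, Bool.true_or, pv_foldl_flag, Prod.mk.injEq]
      refine ⟨trivial, ?_, ?_, ?_⟩
      · simp [pvCapsOf, pvReply, Bool.or_assoc]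
      · simp [pvExclOf, pvReply]; ring
      · simp [pvInsOf, pvReply, Bool.or_assoc]
    · simp only [Bool.not_eq_true] at hm
      simp only [hm, Bool.false_eq_true, if_false, ih]

-- the word predicate of the caps test, on the char-list side
def pvQ (cs : List Char) : Bool :=
  (cs.any PySem.Chars.isupper && !(cs.any PySem.Chars.islower)) && decide (2 < (cs.length : Int))

theorem pv_strAny (s : String) :
    (PySem.Str.split₀ s).any (fun w => pvIsUpperWord w && decide (2 < PySem.Str.len w))
      = (PySem.Chars.split₀ s.toList).any pvQ := by
  rw [← PySem.Str.split₀_map_toList, List.any_map]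
  apply List.any_congr rfl
  intro w
  simp [pvQ, pvIsUpperWord, PySem.Str.len_eq, Function.comp]

-- an insult word is found in the lowered joined text iff it is found in some lowered message
theorem pv_isIn_msgs (w : String) (um : List (List (String × String)))
    (hw : ' ' ∉ w.toList) (hne : w.toList ≠ []) :
    PySem.Str.isIn w (PySem.Str.lower (PySem.Str.join " "
        (um.map (fun msg => (PySem.Dict.mk msg).getD "Reply_Text" ""))))
      = um.any (fun m => PySem.Str.isIn w (PySem.Str.lower (pvReply m))) := by
  rw [PySem.Str.isIn_eq, PySem.Str.toList_lower, PySem.Str.toList_join]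
  have hsep : (" " : String).toList = [' '] := rfl
  rw [hsep, pv_lower_join, pv_isIn_join _ _ hw hne]
  simp only [List.any_map]
  apply List.any_congr rfl
  intro m
  simp [Function.comp, pvReply, PySem.Str.isIn_eq, PySem.Str.toList_lower]

theorem pv_sum_cast {α : Type} (l : List α) (g : α → Nat) :
    (l.map (fun a => ((g a : Nat) : Int))).sum = (((l.map g).sum : Nat) : Int) := by
  induction l with
  | nil => simp
  | cons a t ih => simp [ih]

-- ===== VERDICT (by name: the statement is the Claim_ definition above) =====
theorem analyze_user_tone_spec : Claim_equal_analyze_user_tone := by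
  intro messages target cut _hd
  unfold Spec_analyze_user_tone
  simp only [analyze_user_tone, analyze_user_tone_alt]
  rw [pv_foldB]
  set um := (PySem.List.slice messages none (some cut)).filter
      (fun msg => (PySem.Dict.mk msg).get? "From" == some target) with hum
  by_cases hE : um.isEmpty = true
  · simp [hE]
  · rw [Bool.not_eq_true] at hE
    simp only [hE, Bool.false_eq_true, if_false, Bool.false_or, Bool.not_false, Bool.not_true]
    set T := PySem.Str.join " " (um.map (fun msg => (PySem.Dict.mk msg).getD "Reply_Text" "")) with hT
    have hsep : (" " : String).toList = [' '] := rfl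
    have hTl : T.toList = PySem.Chars.join [' '] (um.map (fun m => (pvReply m).toList)) := by
      rw [hT, PySem.Str.toList_join, hsep, List.map_map]
      rfl
    have hcaps : (decide (0 < ((PySem.Str.split₀ T).map
        (fun w => if pvIsUpperWord w && decide (2 < PySem.Str.len w) then (1 : Int) else 0)).sum))
        = um.any pvCapsOf := by
      rw [PySem.List.sum_map_ite_one_zero]
      have h2 : (PySem.Str.split₀ T).any (fun w => pvIsUpperWord w && decide (2 < PySem.Str.len w))
          = um.any pvCapsOf := by
        rw [pv_strAny, hTl, pv_split0_join, List.any_flatMap, List.any_map]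
        apply List.any_congr rfl
        intro m
        simp only [Function.comp]
        rw [← pv_strAny]
        simp [pvCapsOf]
      rw [← h2]
      apply Bool.coe_iff_coe.mp
      simp only [decide_eq_true_eq, Int.natCast_pos, List.countP_pos_iff, List.any_eq_true]
    have hcount : PySem.Str.count T "!" = (um.map (fun m => (pvReply m).toList.count '!')).sum := by
      rw [PySem.Str.count_eq, hTl]
      have hex : ("!" : String).toList = ['!'] := rfl
      rw [hex, pv_count_single, pv_count_join_excl, List.map_map]
      rfl
    have hexcl : (decide (2 < PySem.Str.count T "!"))
        = decide ((2 : Int) < 0 + (um.map pvExclOf).sum) := by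
      have hm : um.map pvExclOf = um.map (fun m => (((pvReply m).toList.count '!' : Nat) : Int)) := by
        apply List.map_congr_left
        intro m _
        simp only [pvExclOf, PySem.Str.count_eq]
        have hex : ("!" : String).toList = ['!'] := rfl
        rw [hex, pv_count_single]
      rw [decide_eq_decide, zero_add, hm, pv_sum_cast, hcount]
      exact_mod_cast Iff.rfl
    have hins : pvInsults.any (fun w => PySem.Str.isIn w (PySem.Str.lower T)) = um.any pvInsOf := by
      have hword : ∀ w ∈ pvInsults,
          PySem.Str.isIn w (PySem.Str.lower T)
            = um.any (fun m => PySem.Str.isIn w (PySem.Str.lower (pvReply m))) := by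
        intro w hw
        rw [hT]
        refine pv_isIn_msgs w um ?_ ?_
        · fin_cases hw <;> decide
        · fin_cases hw <;> decide
      apply Bool.coe_iff_coe.mp
      simp only [List.any_eq_true]
      constructor
      · rintro ⟨w, hw, hin⟩
        rw [hword w hw, List.any_eq_true] at hin
        obtain ⟨m, hm, hwm⟩ := hin
        refine ⟨m, hm, ?_⟩
        simp only [pvInsOf, List.any_eq_true]
        exact ⟨w, hw, hwm⟩
      · rintro ⟨m, hm, hmi⟩
        simp only [pvInsOf, List.any_eq_true] at hmi
        obtain ⟨w, hw, hwm⟩ := hmi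
        refine ⟨w, hw, ?_⟩
        rw [hword w hw, List.any_eq_true]
        exact ⟨m, hm, hwm⟩
    rw [hcaps, hexcl, hins]
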